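-- pv_equiv track=rewrite | github.com/sandyjameslord/poker_lord | poker_automate.py | determine_what_is_in_a_hand
-- ===== SOURCE A (Python) =====
-- FACES = ["Deuce", "Three", "Four ", "Five ", "Six  ", "Seven", "Eight", "Nine ", "Ten  ", "Jack ", "Queen", "King ", "Ace  "]
--
-- SUITS = ['Hearts  ', 'Diamonds', 'Clubs   ', 'Spades  ']
--
-- def determine_what_is_in_a_hand(hand):
-- 	face_organization = [0,0,0,0,0,0,0,0,0,0,0,0,0] # deuce, three, four, five, six, seven, eight, nine, ten, jack, queen, king, ace
-- 	suit_organization = [0,0,0,0] #spades, diamonds, hearts, clubs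
-- 	for face, suit in hand:
-- 		i = 0
-- 		while i < len(FACES):
-- 			if face.startswith(FACES[i]):
-- 				face_organization[i] += 1
-- 			i += 1
-- 		j = 0
-- 		while j < len(SUITS):
-- 			if suit.startswith(SUITS[j]):
-- 				suit_organization[j] += 1
-- 			j += 1
-- 	hand_organization = face_organization + suit_organization
-- 	return hand_organization
-- ===== SOURCE B (Python) =====
-- FACES = ["Deuce", "Three", "Four ", "Five ", "Six  ", "Seven", "Eight", "Nine ", "Ten  ", "Jack ", "Queen", "King ", "Ace  "]
--
-- SUITS = ['Hearts  ', 'Diamonds', 'Clubs   ', 'Spades  ']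
--
-- def determine_what_is_in_a_hand(hand):
-- 	# Every FACES string is 5 chars and every SUITS string is 8 chars, so
-- 	# face.startswith(F) is exactly face[:5] == F (and suit[:8] == S).
-- 	# Count the two key slices once per card, then project onto the canonical order.
-- 	face_counts = {}
-- 	suit_counts = {}
-- 	for face, suit in hand:
-- 		f = face[:5]
-- 		face_counts[f] = face_counts.get(f, 0) + 1
-- 		s = suit[:8]
-- 		suit_counts[s] = suit_counts.get(s, 0) + 1
-- 	return [face_counts.get(F, 0) for F in FACES] + [suit_counts.get(S, 0) for S in SUITS]
-- ===== Notes on version B (the rewrite author's own statement) =====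
-- stated objective: idiomatic
-- what changed: Replaces A's per-card inner scans over all 13 faces and 4 suits (startswith tests) by a single pass that counts each card's fixed-length key slice in two dicts, then projects the tables onto the canonical FACES/SUITS order.
import Mathlib
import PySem

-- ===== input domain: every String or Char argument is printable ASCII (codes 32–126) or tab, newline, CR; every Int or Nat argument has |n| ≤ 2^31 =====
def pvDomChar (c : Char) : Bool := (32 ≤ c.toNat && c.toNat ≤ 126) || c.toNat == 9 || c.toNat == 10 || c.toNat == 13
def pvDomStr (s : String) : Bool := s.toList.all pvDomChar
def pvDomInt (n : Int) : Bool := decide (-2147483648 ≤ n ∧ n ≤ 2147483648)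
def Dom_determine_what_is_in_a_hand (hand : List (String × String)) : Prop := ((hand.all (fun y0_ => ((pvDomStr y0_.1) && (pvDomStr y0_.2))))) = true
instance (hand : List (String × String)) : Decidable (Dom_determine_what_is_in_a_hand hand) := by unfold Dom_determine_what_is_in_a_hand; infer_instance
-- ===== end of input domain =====

-- B counts each card's fixed-length key slice once into two dicts and projects them onto the
-- canonical FACES/SUITS order, instead of A's per-card startswith scan over all 17 constants.

def FACES : List String := ["Deuce", "Three", "Four ", "Five ", "Six  ", "Seven", "Eight", "Nine ", "Ten  ", "Jack ", "Queen", "King ", "Ace  "]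

def SUITS : List String := ["Hearts  ", "Diamonds", "Clubs   ", "Spades  "]

-- ===== PORT A =====
-- the inner 'while i < len(CONSTS)' loop of A: bump org[i] when s startswith CONSTS[i]
def pvWhileScan (s : String) (consts : List String) (org : List Int) (i : Nat) : List Int :=
  if i < consts.length then
    pvWhileScan s consts
      (if PySem.Str.startswith s (consts.getD i "") then
         PySem.List.pySetD org (i : Int) (PySem.List.pyGetD org (i : Int) 0 + 1)
       else org)
      (i + 1)
  else org
termination_by consts.length - i

def determine_what_is_in_a_hand (hand : List (String × String)) : List Int :=
  let face_organization : List Int := [0,0,0,0,0,0,0,0,0,0,0,0,0]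
  let suit_organization : List Int := [0,0,0,0]
  let st := hand.foldl
    (fun (st : List Int × List Int) c =>
      (pvWhileScan c.1 FACES st.1 0, pvWhileScan c.2 SUITS st.2 0))
    (face_organization, suit_organization)
  st.1 ++ st.2

-- ===== PORT B =====
def determine_what_is_in_a_hand_alt (hand : List (String × String)) : List Int :=
  let counts := hand.foldl
    (fun (st : PySem.Dict String Int × PySem.Dict String Int) c =>
      (st.1.modify (PySem.Str.slice c.1 none (some 5)) 0 (· + 1),
       st.2.modify (PySem.Str.slice c.2 none (some 8)) 0 (· + 1)))
    (PySem.Dict.empty, PySem.Dict.empty)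
  FACES.map (fun F => counts.1.getD F 0) ++ SUITS.map (fun S => counts.2.getD S 0)

-- ===== PRECONDITION & SPEC =====
def Spec_determine_what_is_in_a_hand (hand : List (String × String)) (out : List Int) : Prop := out = determine_what_is_in_a_hand_alt hand
instance (hand : List (String × String)) (out : List Int) : Decidable (Spec_determine_what_is_in_a_hand hand out) := by unfold Spec_determine_what_is_in_a_hand; infer_instance

-- ===== CLAIM (what is proved, stated in full; the proofs are below) =====
def Claim_equal_determine_what_is_in_a_hand : Prop := ∀ (hand : List (String × String)), Dom_determine_what_is_in_a_hand hand → Spec_determine_what_is_in_a_hand hand (determine_what_is_in_a_hand hand)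

-- ===== LEMMAS AND PROOFS =====

-- A's inner while loop, characterised: it bumps every remaining position whose constant is a prefix
theorem pvWhileScan_eq (s : String) (consts : List String) :
    ∀ (k i : Nat) (org : List Int), consts.length - i = k → org.length = consts.length →
      pvWhileScan s consts org i =
        org.take i ++ List.zipWith
          (fun a F => if PySem.Str.startswith s F then a + 1 else a)
          (org.drop i) (consts.drop i) := by
  intro k
  induction k with
  | zero =>
    intro i org hk hlen
    have hi : ¬ i < consts.length := by omega
    rw [pvWhileScan]
    simp [hi, List.drop_eq_nil_of_le (by omega : consts.length ≤ i),
      List.take_of_length_le (by omega : org.length ≤ i)]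
  | succ k ih =>
    intro i org hk hlen
    have hi : i < consts.length := by omega
    have hio : i < org.length := by omega
    rw [pvWhileScan]
    simp only [hi, if_pos]
    have hcd : consts.getD i "" = consts[i] := by simp [List.getD_eq_getElem?_getD, hi]
    have hgd : PySem.List.pyGetD org (i : Int) 0 = org[i] := by
      simp [PySem.List.pyGetD_natCast, List.getD_eq_getElem?_getD, hio]
    have hdrop : org.drop i = org[i] :: org.drop (i+1) := List.drop_eq_getElem_cons hio
    have hdropc : consts.drop i = consts[i] :: consts.drop (i+1) := List.drop_eq_getElem_cons hi
    rw [hdrop, hdropc, List.zipWith_cons_cons]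
    by_cases hb : PySem.Str.startswith s consts[i] = true
    · simp only [hcd, hb, if_pos, PySem.List.pySetD_natCast, hgd]
      have hlen' : (org.set i (org[i] + 1)).length = consts.length := by simp [hlen]
      rw [ih (i+1) _ (by omega) hlen',
        List.drop_set_of_lt (by omega), List.set_eq_take_cons_drop _ hio,
        List.take_append]
      simp [List.length_take, Nat.min_eq_left (le_of_lt hio)]
    · simp only [hcd, hb, if_neg, Bool.false_eq_true, not_false_iff]
      rw [ih (i+1) _ (by omega) hlen]
      have : org.take (i+1) = org.take i ++ [org[i]] := by
        rw [List.take_add_one]; simp [hio]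
      rw [this, List.append_assoc]
      simp

-- composing two pointwise updates against the same constant list
theorem pvZipZip (f g : Int → String → Int) :
    ∀ (xs : List Int) (ys : List String),
      List.zipWith f (List.zipWith g xs ys) ys = List.zipWith (fun a b => f (g a b) b) xs ys := by
  intro xs
  induction xs with
  | nil => intro ys; simp
  | cons x xs ih => intro ys; cases ys <;> simp [ih]

theorem pvZipId : ∀ (xs : List Int) (ys : List String), xs.length = ys.length →
    List.zipWith (fun (a : Int) (_ : String) => a) xs ys = xs := by
  intro xs
  induction xs with
  | nil => intro ys h; simp
  | cons x xs ih =>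
    intro ys h
    cases ys with
    | nil => simp at h
    | cons y ys => simp only [List.zipWith_cons_cons]; rw [ih ys (by simpa using h)]

-- A's fold = pointwise "initial value + number of matching cards"
theorem pvFoldA_eq (l : List (String × String)) :
    ∀ (fo so : List Int), fo.length = FACES.length → so.length = SUITS.length →
      l.foldl (fun (st : List Int × List Int) c =>
          (pvWhileScan c.1 FACES st.1 0, pvWhileScan c.2 SUITS st.2 0)) (fo, so) =
        (List.zipWith (fun a F => a + (l.countP (fun c => PySem.Str.startswith c.1 F) : Int)) fo FACES,
         List.zipWith (fun a S => a + (l.countP (fun c => PySem.Str.startswith c.2 S) : Int)) so SUITS) := by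
  induction l with
  | nil =>
    intro fo so hf hs
    simp only [List.foldl_nil, List.countP_nil, Nat.cast_zero, add_zero]
    rw [pvZipId fo FACES hf, pvZipId so SUITS hs]
  | cons c l ih =>
    intro fo so hf hs
    simp only [List.foldl_cons]
    rw [pvWhileScan_eq c.1 FACES FACES.length 0 fo (Nat.sub_zero _) hf,
        pvWhileScan_eq c.2 SUITS SUITS.length 0 so (Nat.sub_zero _) hs]
    simp only [List.take_zero, List.drop_zero, List.nil_append]
    rw [ih _ _ (by simp [hf]) (by simp [hs]), pvZipZip, pvZipZip]
    congr 1
    · apply List.zipWith_congr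
      refine List.forall₂_iff_get.mpr ⟨by simp [hf], fun i h1 h2 => ?_⟩
      simp only [List.countP_cons]
      push_cast
      split_ifs <;> ring
    · apply List.zipWith_congr
      refine List.forall₂_iff_get.mpr ⟨by simp [hs], fun i h1 h2 => ?_⟩
      simp only [List.countP_cons]
      push_cast
      split_ifs <;> ring

-- startswith by a length-n constant is equality of the length-n head slice
theorem pvSliceEq (s F : String) (n : Nat) (hF : F.toList.length = n) :
    ((PySem.Str.slice s none (some (n : Int))) == F) = PySem.Str.startswith s F := by
  rw [Bool.eq_iff_iff, beq_iff_eq, PySem.Str.startswith_eq, PySem.Chars.startswith_iff,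
    List.prefix_iff_eq_take, hF, ← String.toList_inj, PySem.Str.toList_slice,
    PySem.Chars.slice_eq_listSlice, PySem.List.slice_to_natCast]
  simp [eq_comm]

-- a fold with two independent dict accumulators is two folds
theorem pvPairFold (l : List (String × String)) :
    l.foldl (fun (st : PySem.Dict String Int × PySem.Dict String Int) c =>
        (st.1.modify (PySem.Str.slice c.1 none (some 5)) 0 (· + 1),
         st.2.modify (PySem.Str.slice c.2 none (some 8)) 0 (· + 1)))
      (PySem.Dict.empty, PySem.Dict.empty) =
    (l.foldl (fun d c => PySem.Dict.modify d (PySem.Str.slice c.1 none (some 5)) 0 (· + 1)) PySem.Dict.empty,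
     l.foldl (fun d c => PySem.Dict.modify d (PySem.Str.slice c.2 none (some 8)) 0 (· + 1)) PySem.Dict.empty) := by
  suffices h : ∀ (a b : PySem.Dict String Int),
      l.foldl (fun st c =>
          (st.1.modify (PySem.Str.slice c.1 none (some 5)) 0 (· + 1),
           st.2.modify (PySem.Str.slice c.2 none (some 8)) 0 (· + 1))) (a, b) =
        (l.foldl (fun d c => PySem.Dict.modify d (PySem.Str.slice c.1 none (some 5)) 0 (· + 1)) a,
         l.foldl (fun d c => PySem.Dict.modify d (PySem.Str.slice c.2 none (some 8)) 0 (· + 1)) b) from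
    h _ _
  induction l with
  | nil => intro a b; rfl
  | cons c l ih => intro a b; simp only [List.foldl_cons]; exact ih _ _

-- B's dict fold over the hand is a Counter of the mapped keys
theorem pvDictFold (key : String × String → String) (l : List (String × String)) :
    l.foldl (fun d c => PySem.Dict.modify d (key c) 0 (· + 1)) PySem.Dict.empty =
      PySem.Dict.counter (l.map key) := by
  rw [PySem.Dict.counter_eq_foldl, List.foldl_map]

-- ===== VERDICT (by name: the statement is the Claim_ definition above) =====
theorem determine_what_is_in_a_hand_spec : Claim_equal_determine_what_is_in_a_hand := by
  intro hand _
  show determine_what_is_in_a_hand hand = determine_what_is_in_a_hand_alt hand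
  unfold determine_what_is_in_a_hand determine_what_is_in_a_hand_alt
  dsimp only
  rw [pvFoldA_eq hand _ _ (by simp [FACES]) (by simp [SUITS]),
    pvPairFold hand,
    pvDictFold (fun c => PySem.Str.slice c.1 none (some 5)),
    pvDictFold (fun c => PySem.Str.slice c.2 none (some 8))]
  have hzf : List.zipWith (fun a F => a + ((hand.countP (fun c => PySem.Str.startswith c.1 F)) : Int))
      ([0,0,0,0,0,0,0,0,0,0,0,0,0] : List Int) FACES =
      FACES.map (fun F => ((hand.countP (fun c => PySem.Str.startswith c.1 F)) : Int)) := by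
    simp [FACES]
  have hzs : List.zipWith (fun a S => a + ((hand.countP (fun c => PySem.Str.startswith c.2 S)) : Int))
      ([0,0,0,0] : List Int) SUITS =
      SUITS.map (fun S => ((hand.countP (fun c => PySem.Str.startswith c.2 S)) : Int)) := by
    simp [SUITS]
  rw [hzf, hzs]
  congr 1
  · apply List.map_congr_left
    intro F hFm
    have hF : F.toList.length = 5 := by
      fin_cases hFm <;> decide
    rw [PySem.Dict.getD_counter, List.count_eq_countP, List.countP_map]
    congr 1
    refine List.countP_congr (fun c _ => ?_)
    simp only [Function.comp_apply]
    exact Bool.eq_iff_iff.mp (pvSliceEq c.1 F 5 hF).symm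
  · apply List.map_congr_left
    intro S hSm
    have hS : S.toList.length = 8 := by
      fin_cases hSm <;> decide
    rw [PySem.Dict.getD_counter, List.count_eq_countP, List.countP_map]
    congr 1
    refine List.countP_congr (fun c _ => ?_)
    simp only [Function.comp_apply]
    exact Bool.eq_iff_iff.mp (pvSliceEq c.2 S 8 hS).symm
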